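-- pv_equiv track=rewrite | github.com/LeiXinyue77/icp_multi_wav2wav | preprocess/phase.py | find_delays
-- ===== SOURCE A (Python) =====
-- def find_delays(ecg_peaks, signal_peaks):
--     """
--     找到信号峰值中第一个落后于ECG第一个峰值的点，并计算偏移量。
--
--     参数:
--     ecg_peaks (list): ECG信号的峰值索引。
--     signal_peaks (list): 其他信号的峰值索引（如ICP, ABP, PPG）。
--
--     返回:
--     int: 信号中第一个落后于ECG第一个峰值的峰值索引。
--     int: 偏移量（单位：索引）。
--     """
--     offsets = []
--     used_peaks = set()  # 用于记录已经匹配过的信号峰值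
--     for ecg_peak in ecg_peaks:
--         # 找到第一个大于或等于当前ECG峰值且未使用的信号峰值
--         lagging_peak = next(
--             (sp for sp in signal_peaks if sp >= ecg_peak and sp not in used_peaks),
--             None
--         )
--
--         if lagging_peak is None:
--             offsets.append(0)  # 如果没有找到，偏移量为0
--         else:
--             offset = lagging_peak - ecg_peak
--             offsets.append(offset)
--             used_peaks.add(lagging_peak)  # 将匹配的峰值加入已使用集合
--     return  offsets
-- ===== SOURCE B (Python) =====
-- def _mx(a, b):
--     # max of two Optional values (None = no live leaf)
--     if a is None:
--         return b
--     if b is None: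
--         return a
--     return a if a >= b else b
--
--
-- def _build(vals):
--     # balanced max-segment tree over vals (non-empty): [max, left, right]; leaf = [value, None, None]
--     n = len(vals)
--     if n == 1:
--         return [vals[0], None, None]
--     mid = n // 2
--     l = _build(vals[:mid])
--     r = _build(vals[mid:])
--     return [_mx(l[0], r[0]), l, r]
--
--
-- def _pop(t, e):
--     # precondition: t[0] is not None and t[0] >= e; removes and returns the
--     # leftmost live leaf with value >= e
--     if t[1] is None:
--         v = t[0]
--         t[0] = None
--         return v
--     l, r = t[1], t[2]
--     if l[0] is not None and l[0] >= e:
--         v = _pop(l, e)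
--     else:
--         v = _pop(r, e)
--     t[0] = _mx(l[0], r[0])
--     return v
--
--
-- def find_delays(ecg_peaks, signal_peaks):
--     # Only the first occurrence of each signal value can ever match (an earlier equal
--     # occurrence would have matched first), so dedup keeping first occurrences, then
--     # serve each query "leftmost remaining peak >= e" from a max-segment tree.
--     pool = []
--     seen = set()
--     for x in signal_peaks:
--         if x not in seen:
--             seen.add(x)
--             pool.append(x)
--     offsets = []
--     if not pool:
--         return [0] * len(ecg_peaks)
--     t = _build(pool)
--     for e in ecg_peaks:
--         if t[0] is not None and t[0] >= e:
--             offsets.append(_pop(t, e) - e)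
--         else:
--             offsets.append(0)
--     return offsets
-- ===== Notes on version B (the rewrite author's own statement) =====
-- stated objective: faster
-- what changed: A rescans the whole signal list with a generator and a growing used-set for every ECG peak (O(n*m)); B first dedups the signal peaks keeping first occurrences (only those can ever match) and then answers each query 'leftmost remaining signal peak >= e' with a single root-to-leaf descent of a max-segment tree, deleting the matched leaf (O((n+m) log m)).
import Mathlib
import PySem

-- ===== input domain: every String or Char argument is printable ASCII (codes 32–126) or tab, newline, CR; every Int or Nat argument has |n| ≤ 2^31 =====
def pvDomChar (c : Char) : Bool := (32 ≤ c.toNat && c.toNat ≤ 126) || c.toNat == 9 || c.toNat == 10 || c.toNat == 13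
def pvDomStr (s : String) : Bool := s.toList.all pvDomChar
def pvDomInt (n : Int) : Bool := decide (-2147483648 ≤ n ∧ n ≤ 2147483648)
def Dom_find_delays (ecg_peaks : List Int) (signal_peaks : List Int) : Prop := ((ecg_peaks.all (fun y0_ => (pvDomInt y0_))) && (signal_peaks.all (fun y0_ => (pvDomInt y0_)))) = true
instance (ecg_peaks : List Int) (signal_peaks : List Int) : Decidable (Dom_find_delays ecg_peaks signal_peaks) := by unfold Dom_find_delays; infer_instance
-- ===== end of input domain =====

-- B replaces A's per-ECG-peak rescan of the whole signal list (with a used-set) by a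
-- first-occurrence dedup followed by a max-segment tree answering each query
-- "leftmost remaining signal peak >= e" with one root-to-leaf descent (objective: faster).


-- ===== PORT A =====
-- one iteration of A's for-loop: state = (offsets, used_peaks)
def pvStepA (signal_peaks : List Int) (st : List Int × PySem.Set Int) (ecg_peak : Int) :
    List Int × PySem.Set Int :=
  match signal_peaks.find? (fun sp => decide (ecg_peak ≤ sp) && !(PySem.Set.contains st.2 sp)) with
  | none => (st.1 ++ [0], st.2)
  | some lagging_peak => (st.1 ++ [lagging_peak - ecg_peak], PySem.Set.add st.2 lagging_peak)

def find_delays (ecg_peaks : List Int) (signal_peaks : List Int) : List Int :=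
  (ecg_peaks.foldl (pvStepA signal_peaks) ([], PySem.Set.empty)).1

-- ===== PORT B =====
-- Source B's tree node [mx, left, right]; leaf = [value-or-None, None, None]
inductive PvTree where
  | leaf : Option Int → PvTree
  | node : Option Int → PvTree → PvTree → PvTree
deriving Repr, DecidableEq

-- _mx: max of two Optional values (None = no live leaf)
def pvMx : Option Int → Option Int → Option Int
  | none, b => b
  | a, none => a
  | some a, some b => some (if b ≤ a then a else b)

-- t[0]
def pvMxOf : PvTree → Option Int
  | .leaf mv => mv
  | .node m _ _ => m

-- _build (Source B guards against []; the [] case here is a totality guard only)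
def pvBuild : List Int → PvTree
  | [] => .leaf none
  | [v] => .leaf (some v)
  | x :: y :: rest =>
    let mid := (x :: y :: rest).length / 2
    let lt := pvBuild ((x :: y :: rest).take mid)
    let rt := pvBuild ((x :: y :: rest).drop mid)
    .node (pvMx (pvMxOf lt) (pvMxOf rt)) lt rt
termination_by l => l.length
decreasing_by
  · simp only [List.length_take, List.length_cons]; omega
  · simp only [List.length_drop, List.length_cons]; omega

-- _pop: Source B mutates t and returns the value; here: (value, updated tree)
def pvPop : PvTree → Int → Option Int × PvTree
  | .leaf mv, _ => (mv, .leaf none)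
  | .node _ l r, e =>
    let goLeft := match pvMxOf l with
      | some ml => decide (e ≤ ml)
      | none => false
    if goLeft then
      let (v, l') := pvPop l e
      (v, .node (pvMx (pvMxOf l') (pvMxOf r)) l' r)
    else
      let (v, r') := pvPop r e
      (v, .node (pvMx (pvMxOf l) (pvMxOf r')) l r')

-- first-occurrence dedup loop: state = (pool, seen)
def pvStepU (ps : List Int × PySem.Set Int) (x : Int) : List Int × PySem.Set Int :=
  if PySem.Set.contains ps.2 x then ps else (ps.1 ++ [x], PySem.Set.add ps.2 x)

-- one iteration of Source B's main loop: state = (offsets, tree)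
def pvStepB (st : List Int × PvTree) (e : Int) : List Int × PvTree :=
  match pvMxOf st.2 with
  | some m =>
    if e ≤ m then
      let (v, t') := pvPop st.2 e
      (st.1 ++ [v.getD 0 - e], t')    -- getD 0: totality shim; under the guard v is always some
    else (st.1 ++ [0], st.2)
  | none => (st.1 ++ [0], st.2)

def find_delays_alt (ecg_peaks : List Int) (signal_peaks : List Int) : List Int :=
  let pool := (signal_peaks.foldl pvStepU ([], PySem.Set.empty)).1
  if pool = [] then List.replicate ecg_peaks.length 0
  else (ecg_peaks.foldl pvStepB ([], pvBuild pool)).1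

-- ===== PRECONDITION & SPEC =====
def Spec_find_delays (ecg_peaks : List Int) (signal_peaks : List Int) (out : List Int) : Prop := out = find_delays_alt ecg_peaks signal_peaks
instance (ecg_peaks : List Int) (signal_peaks : List Int) (out : List Int) : Decidable (Spec_find_delays ecg_peaks signal_peaks out) := by unfold Spec_find_delays; infer_instance

-- ===== CLAIM (what is proved, stated in full; the proofs are below) =====
def Claim_equal_find_delays : Prop := ∀ (ecg_peaks : List Int) (signal_peaks : List Int), Dom_find_delays ecg_peaks signal_peaks → Spec_find_delays ecg_peaks signal_peaks (find_delays ecg_peaks signal_peaks)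

-- ===== LEMMAS AND PROOFS =====

-- intermediate program used only by the proof: A with the used-set fused away —
-- the pool is the signal list with already-matched values filtered out
def pvPool : List Int → List Int → List Int
  | [], _ => []
  | e :: es, pool =>
    match pool.find? (fun sp => decide (e ≤ sp)) with
    | none => 0 :: pvPool es pool
    | some hit => (hit - e) :: pvPool es (pool.filter (fun sp => decide (sp ≠ hit)))

-- proof-side characterisation of first-occurrence dedup
def pvUniqF : List Int → List Int
  | [] => []
  | x :: xs => x :: pvUniqF (xs.filter (fun y => decide (y ≠ x)))
termination_by l => l.length
decreasing_by
  simp only [List.length_cons, Nat.lt_succ_iff, List.length_unattach]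
  exact le_trans (List.length_filter_le _ _) (by simp)

-- leaf values of the live (not-yet-deleted) leaves, left to right
def pvLive : PvTree → List Int
  | .leaf none => []
  | .leaf (some v) => [v]
  | .node _ l r => pvLive l ++ pvLive r

-- the cached max field is the max of the children's fields
def pvWF : PvTree → Prop
  | .leaf _ => True
  | .node m l r => pvWF l ∧ pvWF r ∧ m = pvMx (pvMxOf l) (pvMxOf r)

-- searching a filtered list is searching with the conjoined predicate
lemma pv_find?_filter (l : List Int) (p q : Int → Bool) :
    (l.filter p).find? q = l.find? (fun x => q x && p x) := by
  induction l with
  | nil => rfl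
  | cons a tl ih => by_cases hp : p a <;> by_cases hq : q a <;> simp [List.find?, hp, hq, ih]

-- a conjunct implied by the predicate can be dropped from find?
lemma pv_find?_imp (l : List Int) (p q : Int → Bool) (h : ∀ x, p x = true → q x = true) :
    l.find? (fun x => p x && q x) = l.find? p := by
  induction l with
  | nil => rfl
  | cons a tl ih =>
    by_cases hp : p a
    · simp [List.find?, hp, h a hp]
    · simp [List.find?, hp, ih]

-- adding hit to the used set = also testing equality with hit
lemma pv_contains_add (used : PySem.Set Int) (hit sp : Int) :
    PySem.Set.contains (PySem.Set.add used hit) sp =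
      (PySem.Set.contains used sp || sp == hit) := by
  by_cases h1 : sp ∈ used <;> by_cases h2 : sp = hit <;> simp [h1, h2, PySem.Set.mem_add]

-- Stage A: A's fold with a used-set equals pvPool on the filtered signal list
lemma pv_a_pool (signal : List Int) :
    ∀ (ecg : List Int) (used : PySem.Set Int) (acc : List Int),
      (ecg.foldl (pvStepA signal) (acc, used)).1 =
        acc ++ pvPool ecg (signal.filter (fun sp => !(PySem.Set.contains used sp))) := by
  intro ecg
  induction ecg with
  | nil => intro used acc; simp [pvPool]
  | cons e es ih =>
    intro used acc
    have hfind : (signal.filter (fun sp => !(PySem.Set.contains used sp))).find?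
          (fun sp => decide (e ≤ sp)) =
        signal.find? (fun sp => decide (e ≤ sp) && !(PySem.Set.contains used sp)) :=
      pv_find?_filter signal _ _
    simp only [List.foldl_cons, pvStepA]
    cases hres : signal.find? (fun sp => decide (e ≤ sp) && !(PySem.Set.contains used sp)) with
    | none =>
      simp only [pvPool, hfind, hres]
      rw [ih used (acc ++ [0])]
      simp
    | some hit =>
      simp only [pvPool, hfind, hres]
      rw [ih (PySem.Set.add used hit) (acc ++ [hit - e])]
      have hpool : signal.filter (fun sp => !(PySem.Set.contains (PySem.Set.add used hit) sp)) =
          (signal.filter (fun sp => !(PySem.Set.contains used sp))).filter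
            (fun sp => decide (sp ≠ hit)) := by
        rw [List.filter_filter]
        apply List.filter_congr
        intro sp _
        rw [pv_contains_add]
        by_cases h2 : sp = hit <;> simp [h2]
      rw [hpool]
      simp

-- Stage U: the dedup loop computes pvUniqF
lemma pv_uniq_fold :
    ∀ (xs : List Int) (seen : PySem.Set Int) (acc : List Int),
      (xs.foldl pvStepU (acc, seen)).1 =
        acc ++ pvUniqF (xs.filter (fun x => !(PySem.Set.contains seen x))) := by
  intro xs
  induction xs with
  | nil => intro seen acc; simp only [List.foldl_nil, List.filter_nil]; rw [pvUniqF]; simp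
  | cons x tl ih =>
    intro seen acc
    by_cases hx : PySem.Set.contains seen x
    · have hx' : x ∈ seen := by simpa using hx
      simp only [List.foldl_cons, pvStepU, hx, if_pos]
      rw [ih seen acc]
      simp [hx']
    · have hx' : x ∉ seen := by simpa using hx
      simp only [List.foldl_cons, pvStepU, hx, if_neg, Bool.not_eq_true]
      rw [ih (PySem.Set.add seen x) (acc ++ [x])]
      have hf : tl.filter (fun y => !(PySem.Set.contains (PySem.Set.add seen x) y)) =
          (tl.filter (fun y => !(PySem.Set.contains seen y))).filter
            (fun y => decide (y ≠ x)) := by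
        rw [List.filter_filter]
        apply List.filter_congr
        intro y _
        rw [pv_contains_add]
        by_cases h2 : y = x <;> simp [h2]
      rw [hf]
      have hcons : (x :: tl).filter (fun y => !(PySem.Set.contains seen y)) =
          x :: tl.filter (fun y => !(PySem.Set.contains seen y)) := by
        simp [hx']
      rw [hcons, pvUniqF]
      simp

lemma pv_uniq_mem_aux : ∀ (n : ℕ) (l : List Int), l.length ≤ n →
    ∀ a, a ∈ pvUniqF l → a ∈ l := by
  intro n
  induction n with
  | zero =>
    intro l hl a h
    match l with
    | [] => rw [pvUniqF] at h; simp at h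
    | x :: xs => simp at hl
  | succ n ih =>
    intro l hl a h
    match l with
    | [] => rw [pvUniqF] at h; simp at h
    | x :: xs =>
      rw [pvUniqF] at h
      rcases List.mem_cons.1 h with h | h
      · simp [h]
      · have hlen : (xs.filter (fun y => decide (y ≠ x))).length ≤ n :=
          le_trans (List.length_filter_le _ _) (by simpa using hl)
        exact List.mem_cons_of_mem _ (List.mem_of_mem_filter (ih _ hlen a h))

lemma pv_uniq_mem (l : List Int) (a : Int) (h : a ∈ pvUniqF l) : a ∈ l :=
  pv_uniq_mem_aux l.length l le_rfl a h

lemma pv_uniq_nodup_aux : ∀ (n : ℕ) (l : List Int), l.length ≤ n → (pvUniqF l).Nodup := by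
  intro n
  induction n with
  | zero =>
    intro l hl
    match l with
    | [] => rw [pvUniqF]; simp
    | x :: xs => simp at hl
  | succ n ih =>
    intro l hl
    match l with
    | [] => rw [pvUniqF]; simp
    | x :: xs =>
      rw [pvUniqF]
      have hlen : (xs.filter (fun y => decide (y ≠ x))).length ≤ n :=
        le_trans (List.length_filter_le _ _) (by simpa using hl)
      refine List.nodup_cons.2 ⟨?_, ih _ hlen⟩
      intro hx
      have := List.of_mem_filter (pv_uniq_mem _ _ hx)
      simp at this

lemma pv_uniq_nodup (l : List Int) : (pvUniqF l).Nodup :=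
  pv_uniq_nodup_aux l.length l le_rfl

-- dedup commutes with removing all occurrences of a value
lemma pv_uniq_filter_aux : ∀ (n : ℕ) (l : List Int), l.length ≤ n → ∀ (v : Int),
    pvUniqF (l.filter (fun y => decide (y ≠ v))) =
      (pvUniqF l).filter (fun y => decide (y ≠ v)) := by
  intro n
  induction n with
  | zero =>
    intro l hl v
    match l with
    | [] => simp only [List.filter_nil]; rw [pvUniqF]; simp
    | x :: xs => simp at hl
  | succ n ih =>
    intro l hl v
    match l with
    | [] => simp only [List.filter_nil]; rw [pvUniqF]; simp
    | x :: xs =>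
      have hlen : (xs.filter (fun y => decide (y ≠ x))).length ≤ n :=
        le_trans (List.length_filter_le _ _) (by simpa using hl)
      have hlen2 : (xs.filter (fun y => decide (y ≠ v))).length ≤ n :=
        le_trans (List.length_filter_le _ _) (by simpa using hl)
      by_cases hxv : x = v
      · subst hxv
        have h1 : (x :: xs).filter (fun y => decide (y ≠ x)) =
            xs.filter (fun y => decide (y ≠ x)) := by simp
        rw [h1, pvUniqF]
        have h2 : (x :: pvUniqF (xs.filter (fun y => decide (y ≠ x)))).filter
            (fun y => decide (y ≠ x)) =
            (pvUniqF (xs.filter (fun y => decide (y ≠ x)))).filter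
              (fun y => decide (y ≠ x)) := by simp
        rw [h2, ← ih _ hlen x, List.filter_filter]
        congr 1
        apply List.filter_congr
        intro y _
        by_cases h : y = x <;> simp [h]
      · have h1 : (x :: xs).filter (fun y => decide (y ≠ v)) =
            x :: xs.filter (fun y => decide (y ≠ v)) := by simp [hxv]
        rw [h1, pvUniqF, pvUniqF]
        have h2 : (x :: pvUniqF (xs.filter (fun y => decide (y ≠ x)))).filter
            (fun y => decide (y ≠ v)) =
            x :: (pvUniqF (xs.filter (fun y => decide (y ≠ x)))).filter
              (fun y => decide (y ≠ v)) := by simp [hxv]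
        rw [h2]
        congr 1
        rw [List.filter_filter, ← ih _ hlen v, List.filter_filter]
        have hcomm : ∀ (p q : Int → Bool) (m : List Int),
            m.filter (fun a => p a && q a) = m.filter (fun a => q a && p a) := by
          intro p q m
          apply List.filter_congr
          intro y _
          exact Bool.and_comm _ _
        exact congrArg pvUniqF (hcomm _ _ _)

lemma pv_uniq_filter (l : List Int) (v : Int) :
    pvUniqF (l.filter (fun y => decide (y ≠ v))) =
      (pvUniqF l).filter (fun y => decide (y ≠ v)) :=
  pv_uniq_filter_aux l.length l le_rfl v

-- the first peak >= e in the dedup'd pool is the first peak >= e in the pool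
lemma pv_find?_uniq_aux : ∀ (n : ℕ) (pool : List Int), pool.length ≤ n → ∀ (e : Int),
    (pvUniqF pool).find? (fun sp => decide (e ≤ sp)) =
      pool.find? (fun sp => decide (e ≤ sp)) := by
  intro n
  induction n with
  | zero =>
    intro pool hl e
    match pool with
    | [] => rw [pvUniqF]
    | x :: xs => simp at hl
  | succ n ih =>
    intro pool hl e
    match pool with
    | [] => rw [pvUniqF]
    | x :: xs =>
      rw [pvUniqF]
      by_cases hx : e ≤ x
      · simp [List.find?, hx]
      · have hlen : (xs.filter (fun y => decide (y ≠ x))).length ≤ n :=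
          le_trans (List.length_filter_le _ _) (by simpa using hl)
        simp only [List.find?, show (decide (e ≤ x)) = false by simp [hx]]
        rw [ih _ hlen e, pv_find?_filter]
        apply pv_find?_imp
        intro y hy
        simp at hy ⊢
        omega

lemma pv_find?_uniq (pool : List Int) (e : Int) :
    (pvUniqF pool).find? (fun sp => decide (e ≤ sp)) =
      pool.find? (fun sp => decide (e ≤ sp)) :=
  pv_find?_uniq_aux pool.length pool le_rfl e

-- matching against the dedup'd pool gives the same offsets
lemma pv_pool_uniq : ∀ (ecg pool : List Int), pvPool ecg pool = pvPool ecg (pvUniqF pool) := by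
  intro ecg
  induction ecg with
  | nil => intro pool; simp [pvPool]
  | cons e es ih =>
    intro pool
    simp only [pvPool, pv_find?_uniq]
    cases hres : pool.find? (fun sp => decide (e ≤ sp)) with
    | none => dsimp only; rw [ih pool]
    | some hit => dsimp only; rw [ih (pool.filter (fun sp => decide (sp ≠ hit))), pv_uniq_filter]

-- the cached max is attained and bounds all live leaves
lemma pv_mx_spec : ∀ (t : PvTree), pvWF t →
    (pvMxOf t = none ∧ pvLive t = []) ∨
      (∃ m, pvMxOf t = some m ∧ m ∈ pvLive t ∧ ∀ x ∈ pvLive t, x ≤ m) := by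
  intro t
  induction t with
  | leaf mv =>
    intro _
    cases mv with
    | none => left; simp [pvMxOf, pvLive]
    | some v => right; exact ⟨v, by simp [pvMxOf, pvLive]⟩
  | node m l r ihl ihr =>
    intro hwf
    obtain ⟨hwl, hwr, hm⟩ := hwf
    have hmx : pvMxOf (PvTree.node m l r) = m := rfl
    have hlive : pvLive (PvTree.node m l r) = pvLive l ++ pvLive r := rfl
    rcases ihl hwl with ⟨hl1, hl2⟩ | ⟨ml, hl1, hl2, hl3⟩ <;>
      rcases ihr hwr with ⟨hr1, hr2⟩ | ⟨mr, hr1, hr2, hr3⟩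
    · left
      constructor
      · rw [hmx, hm, hl1, hr1]; rfl
      · rw [hlive, hl2, hr2]; rfl
    · right
      refine ⟨mr, ?_, ?_, ?_⟩
      · rw [hmx, hm, hl1, hr1]; rfl
      · rw [hlive]; exact List.mem_append_right _ hr2
      · intro x hx
        rw [hlive, hl2] at hx
        simp only [List.nil_append] at hx
        exact hr3 x hx
    · right
      refine ⟨ml, ?_, ?_, ?_⟩
      · rw [hmx, hm, hl1, hr1]; rfl
      · rw [hlive]; exact List.mem_append_left _ hl2
      · intro x hx
        rw [hlive, hr2] at hx
        simp only [List.append_nil] at hx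
        exact hl3 x hx
    · right
      refine ⟨if mr ≤ ml then ml else mr, ?_, ?_, ?_⟩
      · rw [hmx, hm, hl1, hr1]; rfl
      · rw [hlive]
        by_cases h : mr ≤ ml
        · simp only [h, if_pos]; exact List.mem_append_left _ hl2
        · rw [if_neg h]; exact List.mem_append_right _ hr2
      · intro x hx
        rw [hlive] at hx
        rcases List.mem_append.1 hx with hx | hx
        · have := hl3 x hx; by_cases h : mr ≤ ml <;> simp [h] <;> omega
        · have := hr3 x hx; by_cases h : mr ≤ ml <;> simp [h] <;> omega

-- pvBuild of a non-empty list: its live leaves are exactly the list, and it is WF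
lemma pv_build_spec : ∀ (n : ℕ) (l : List Int), l.length ≤ n → l ≠ [] →
    pvLive (pvBuild l) = l ∧ pvWF (pvBuild l) := by
  intro n
  induction n with
  | zero => intro l hl hne; cases l with
    | nil => exact absurd rfl hne
    | cons a t => simp at hl
  | succ n ih =>
    intro l hl hne
    match l with
    | [] => exact absurd rfl hne
    | [v] => exact ⟨by simp [pvBuild, pvLive], by simp [pvBuild, pvWF]⟩
    | a :: b :: rest =>
      rw [pvBuild]
      set L := a :: b :: rest with hL
      have hlen : 2 ≤ L.length := by simp [hL]
      have hmid1 : 1 ≤ L.length / 2 := by omega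
      have hmid2 : L.length / 2 < L.length := by omega
      have htake_len : (L.take (L.length / 2)).length = L.length / 2 := by
        simp [List.length_take]; omega
      have hdrop_len : (L.drop (L.length / 2)).length = L.length - L.length / 2 := by
        simp [List.length_drop]
      have htake_ne : L.take (L.length / 2) ≠ [] := by
        intro h; rw [h] at htake_len; simp at htake_len; omega
      have hdrop_ne : L.drop (L.length / 2) ≠ [] := by
        intro h; rw [h] at hdrop_len; simp at hdrop_len; omega
      have h1 := ih (L.take (L.length / 2)) (by rw [htake_len]; omega) htake_ne
      have h2 := ih (L.drop (L.length / 2)) (by rw [hdrop_len]; omega) hdrop_ne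
      constructor
      · simp only [pvLive, h1.1, h2.1, List.take_append_drop]
      · exact ⟨h1.2, h2.2, rfl⟩

-- popping under the guard removes exactly the leftmost live leaf >= e
lemma pv_pop_spec : ∀ (t : PvTree), pvWF t → (pvLive t).Nodup →
    ∀ (e m : Int), pvMxOf t = some m → e ≤ m →
    ∃ v t', pvPop t e = (some v, t') ∧
      (pvLive t).find? (fun x => decide (e ≤ x)) = some v ∧
      pvLive t' = (pvLive t).filter (fun x => decide (x ≠ v)) ∧
      pvWF t' := by
  intro t
  induction t with
  | leaf mv =>
    intro _ _ e m hm he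
    cases mv with
    | none => simp [pvMxOf] at hm
    | some v =>
      simp only [pvMxOf, Option.some.injEq] at hm
      subst hm
      refine ⟨v, .leaf none, rfl, ?_, ?_, trivial⟩
      · simp [pvLive, he]
      · simp [pvLive]
  | node mt l r ihl ihr =>
    intro hwf hnd e m hm he
    obtain ⟨hwl, hwr, hmx⟩ := hwf
    have hndl : (pvLive l).Nodup := (List.nodup_append.1 (by simpa [pvLive] using hnd)).1
    have hndr : (pvLive r).Nodup := (List.nodup_append.1 (by simpa [pvLive] using hnd)).2.1
    have hdisj : ∀ x ∈ pvLive l, x ∉ pvLive r := by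
      have h := (List.nodup_append.1 (by simpa [pvLive] using hnd)).2.2
      intro x hx hx'
      exact h x hx x hx' rfl
    simp only [pvMxOf] at hm
    subst hm
    by_cases hgo : (match pvMxOf l with
        | some ml => decide (e ≤ ml)
        | none => false) = true
    · -- descend left
      obtain ⟨ml, hml, hle⟩ : ∃ ml, pvMxOf l = some ml ∧ e ≤ ml := by
        cases h : pvMxOf l with
        | none => rw [h] at hgo; simp at hgo
        | some ml => rw [h] at hgo; simp at hgo; exact ⟨ml, rfl, hgo⟩
      obtain ⟨v, l', hpop, hfind, hlive, hwf'⟩ := ihl hwl hndl e ml hml hle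
      refine ⟨v, .node (pvMx (pvMxOf l') (pvMxOf r)) l' r, ?_, ?_, ?_, hwf', hwr, rfl⟩
      · simp only [pvPop, hgo, if_pos, hpop]
      · simp only [pvLive]; rw [List.find?_append, hfind]; rfl
      · have hv : v ∈ pvLive l := List.mem_of_find?_eq_some hfind
        have : (pvLive r).filter (fun x => decide (x ≠ v)) = pvLive r := by
          rw [List.filter_eq_self]
          intro x hx
          have : x ≠ v := fun hxv => hdisj v hv (hxv ▸ hx)
          simp [this]
        simp only [pvLive, List.filter_append, hlive, this]
    · -- descend right
      have hlsmall : ∀ x ∈ pvLive l, x < e := by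
        rcases pv_mx_spec l hwl with ⟨h1, h2⟩ | ⟨ml, h1, h2, h3⟩
        · simp [h2]
        · rw [h1] at hgo
          simp at hgo
          intro x hx
          exact lt_of_le_of_lt (h3 x hx) hgo
      obtain ⟨mr, hmr, hre⟩ : ∃ mr, pvMxOf r = some mr ∧ e ≤ mr := by
        cases hr : pvMxOf r with
        | none =>
          exfalso
          cases hl : pvMxOf l with
          | none => rw [hl, hr] at hmx; simp [pvMx] at hmx
          | some ml =>
            rw [hl, hr] at hmx
            simp [pvMx] at hmx
            rw [hl] at hgo
            simp at hgo
            omega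
        | some mr =>
          refine ⟨mr, rfl, ?_⟩
          cases hl : pvMxOf l with
          | none => rw [hl, hr] at hmx; simp [pvMx] at hmx; omega
          | some ml =>
            rw [hl, hr] at hmx
            rw [hl] at hgo
            simp at hgo
            simp [pvMx] at hmx
            by_cases h : mr ≤ ml <;> simp [h] at hmx <;> omega
      obtain ⟨v, r', hpop, hfind, hlive, hwf'⟩ := ihr hwr hndr e mr hmr hre
      refine ⟨v, .node (pvMx (pvMxOf l) (pvMxOf r')) l r', ?_, ?_, ?_, hwl, hwf', rfl⟩
      · simp only [pvPop, hgo, Bool.false_eq_true, hpop]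
        simp
      · have hfl : (pvLive l).find? (fun x => decide (e ≤ x)) = none := by
          rw [List.find?_eq_none]
          intro x hx
          have := hlsmall x hx
          simp
          omega
        simp only [pvLive]; rw [List.find?_append, hfl]; simpa using hfind
      · have hv : v ∈ pvLive r := List.mem_of_find?_eq_some hfind
        have : (pvLive l).filter (fun x => decide (x ≠ v)) = pvLive l := by
          rw [List.filter_eq_self]
          intro x hx
          have : x ≠ v := fun hxv => hdisj x hx (hxv ▸ hv)
          simp [this]
        simp only [pvLive, List.filter_append, hlive, this]

-- no signal peaks: every offset is 0
lemma pv_pool_nil : ∀ (ecg : List Int), pvPool ecg [] = List.replicate ecg.length 0 := by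
  intro ecg
  induction ecg with
  | nil => simp [pvPool]
  | cons e es ih => simp [pvPool, List.find?, List.replicate, ih]

-- Stage T: Source B's main loop over the tree computes pvPool on the live leaves
lemma pv_b_fold : ∀ (ecg : List Int) (t : PvTree) (acc : List Int), pvWF t → (pvLive t).Nodup →
    (ecg.foldl pvStepB (acc, t)).1 = acc ++ pvPool ecg (pvLive t) := by
  intro ecg
  induction ecg with
  | nil => intro t acc _ _; simp [pvPool]
  | cons e es ih =>
    intro t acc hwf hnd
    simp only [List.foldl_cons, pvStepB]
    cases hm : pvMxOf t with
    | none =>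
      have hlive : pvLive t = [] := by
        rcases pv_mx_spec t hwf with ⟨h1, h2⟩ | ⟨m, h1, _, _⟩
        · exact h2
        · rw [hm] at h1; cases h1
      rw [ih t (acc ++ [0]) hwf hnd]
      simp only [pvPool, hlive, List.find?_nil]
      simp
    | some m =>
      dsimp only
      by_cases he : e ≤ m
      · obtain ⟨v, t', hpop, hfind, hlive, hwf'⟩ := pv_pop_spec t hwf hnd e m hm he
        rw [if_pos he, hpop]
        dsimp only
        simp only [Option.getD_some]
        have hnd' : (pvLive t').Nodup := by rw [hlive]; exact hnd.filter _
        rw [ih t' (acc ++ [v - e]) hwf' hnd']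
        simp only [pvPool, hfind, hlive]
        simp
      · rw [if_neg he]
        have hfl : (pvLive t).find? (fun x => decide (e ≤ x)) = none := by
          rw [List.find?_eq_none]
          intro x hx
          rcases pv_mx_spec t hwf with ⟨h1, _⟩ | ⟨m', h1, _, h3⟩
          · rw [hm] at h1; cases h1
          · rw [hm] at h1
            injection h1 with h1
            subst h1
            have := h3 x hx
            simp
            omega
        rw [ih t (acc ++ [0]) hwf hnd]
        simp only [pvPool, hfl]
        simp

-- ===== VERDICT (by name: the statement is the Claim_ definition above) =====
theorem find_delays_spec : Claim_equal_find_delays := by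
  intro ecg signal _
  show find_delays ecg signal = find_delays_alt ecg signal
  unfold find_delays find_delays_alt
  rw [pv_a_pool signal ecg PySem.Set.empty []]
  have hfl : signal.filter (fun sp => !(PySem.Set.contains PySem.Set.empty sp)) = signal := by
    rw [List.filter_eq_self]; intro x _; simp [PySem.Set.empty, PySem.Set.contains]
  rw [hfl]
  have hpool : (signal.foldl pvStepU ([], PySem.Set.empty)).1 = pvUniqF signal := by
    rw [pv_uniq_fold signal PySem.Set.empty []]
    have : signal.filter (fun x => !(PySem.Set.contains PySem.Set.empty x)) = signal := by
      rw [List.filter_eq_self]; intro x _; simp [PySem.Set.empty, PySem.Set.contains]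
    rw [this]
    simp
  rw [hpool, pv_pool_uniq ecg signal]
  by_cases hne : pvUniqF signal = []
  · rw [hne]
    rw [pv_pool_nil]
    simp
  · rw [if_neg hne]
    obtain ⟨hlive, hwf⟩ := pv_build_spec (pvUniqF signal).length (pvUniqF signal) le_rfl hne
    rw [pv_b_fold ecg (pvBuild (pvUniqF signal)) [] hwf (by rw [hlive]; exact pv_uniq_nodup signal)]
    rw [hlive]
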